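-- pv_equiv track=rewrite | github.com/BIDS-Xu-Lab/Biomedical-NLP-Benchmarks | GPT/extractive_tasks/run_convert_pred_2_json.py | convert_ne_list_2_iob2
-- ===== SOURCE A (Python) =====
-- def convert_ne_list_2_iob2(gold_tokens, ne_lists):
--
--     iob2_labels = []
--     for index, (tokens, ne_list) in enumerate(zip(gold_tokens, ne_lists)):
--
--         start = 0
--         labels = ['O' for _ in range(len(tokens))]
--
--         if len(ne_list) != 0:
--
--             for ne in ne_list:
--                 start, end, ne_text = ne
--
--                 offset = 0
--                 begin_ne = False
--                 for i, token in enumerate(tokens):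
--                     if offset == start:
--                         labels[i] = 'B'
--                         begin_ne = True
--                     elif begin_ne and start < offset and offset + len(token) <= end:
--                         labels[i] = 'I'
--                     else:
--                         begin_ne = False
--                     offset += len(token)
--
--         iob2_labels.append(labels)
--
--     return iob2_labels
-- ===== SOURCE B (Python) =====
-- def convert_ne_list_2_iob2(gold_tokens, ne_lists):
--     result = []
--     for tokens, ne_list in zip(gold_tokens, ne_lists):
--         # one pass: map each cumulative character offset to the first token index starting there
--         first = {}
--         offset = 0
--         for i, t in enumerate(tokens):
--             if offset not in first:
--                 first[offset] = i
--             offset += len(t)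
--         labels = ['O'] * len(tokens)
--         for start, end, _ in ne_list:
--             i = first.get(start)
--             if i is not None:
--                 o = start
--                 for j in range(i, len(tokens)):
--                     t = tokens[j]
--                     if o == start:
--                         labels[j] = 'B'
--                     elif o + len(t) <= end:
--                         labels[j] = 'I'
--                     else:
--                         break
--                     o += len(t)
--         result.append(labels)
--     return result
-- ===== Notes on version B (the rewrite author's own statement) =====
-- stated objective: faster
-- what changed: Instead of rescanning every token of the sentence for every named entity, B builds one offset-to-first-token-index dict per sentence in a single pass, looks the entity start offset up directly, and scans only the tokens of the entity span (breaking out as soon as the span ends).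
import Mathlib
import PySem

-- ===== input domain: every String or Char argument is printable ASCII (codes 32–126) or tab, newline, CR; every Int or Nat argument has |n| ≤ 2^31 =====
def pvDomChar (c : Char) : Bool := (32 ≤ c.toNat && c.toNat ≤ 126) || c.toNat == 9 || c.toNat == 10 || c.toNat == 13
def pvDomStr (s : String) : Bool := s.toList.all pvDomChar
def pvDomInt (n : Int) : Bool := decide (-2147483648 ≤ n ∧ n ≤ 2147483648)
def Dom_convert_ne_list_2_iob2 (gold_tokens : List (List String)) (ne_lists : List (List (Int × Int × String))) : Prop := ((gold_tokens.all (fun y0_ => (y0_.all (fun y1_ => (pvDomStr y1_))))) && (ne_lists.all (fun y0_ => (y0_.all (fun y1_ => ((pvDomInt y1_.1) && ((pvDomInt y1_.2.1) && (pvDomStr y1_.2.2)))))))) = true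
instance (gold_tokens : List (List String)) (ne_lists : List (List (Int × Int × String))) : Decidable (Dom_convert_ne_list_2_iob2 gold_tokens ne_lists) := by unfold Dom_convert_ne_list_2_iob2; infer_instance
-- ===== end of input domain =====

-- B replaces A's per-entity full rescan of the sentence by a per-sentence offset->first-token-index
-- dict plus a scan of only the entity span (objective: faster, asymptotically fewer token visits).


-- ===== PORT A =====
def convert_ne_list_2_iob2 (gold_tokens : List (List String)) (ne_lists : List (List (Int × Int × String))) : List (List String) :=
  (gold_tokens.zip ne_lists).foldl (fun iob2_labels p =>
    let tokens := p.1
    let ne_list := p.2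
    let labels0 : List String := (PySem.List.pyRange 0 (PySem.List.len tokens) 1).map (fun _ => "O")
    let labels :=
      if ne_list.length ≠ 0 then
        ne_list.foldl (fun labels ne =>
          let start := ne.1
          let stop := ne.2.1
          ((PySem.List.enumerate tokens 0).foldl
            (fun (st : List String × Int × Bool) it =>
              if st.2.1 = start then
                (PySem.List.pySetD st.1 it.1 "B", st.2.1 + PySem.Str.len it.2, true)
              else if st.2.2 && decide (start < st.2.1) && decide (st.2.1 + PySem.Str.len it.2 ≤ stop) then
                (PySem.List.pySetD st.1 it.1 "I", st.2.1 + PySem.Str.len it.2, true)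
              else
                (st.1, st.2.1 + PySem.Str.len it.2, false))
            (labels, 0, false)).1) labels0
      else labels0
    iob2_labels ++ [labels]) []

-- ===== PORT B =====
-- B-side helper: Source B's 'for j in range(i, len(tokens)): … else break' loop, recursing on the index list
def pvBScan (start stop : Int) (tokens : List String) : List Int → List String → Int → List String
  | [], labels, _ => labels
  | j :: js, labels, o =>
    let t := PySem.List.pyGetD tokens j ""
    if o = start then pvBScan start stop tokens js (PySem.List.pySetD labels j "B") (o + PySem.Str.len t)
    else if o + PySem.Str.len t ≤ stop then pvBScan start stop tokens js (PySem.List.pySetD labels j "I") (o + PySem.Str.len t)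
    else labels

def convert_ne_list_2_iob2_alt (gold_tokens : List (List String)) (ne_lists : List (List (Int × Int × String))) : List (List String) :=
  (gold_tokens.zip ne_lists).foldl (fun result p =>
    let tokens := p.1
    let first := ((PySem.List.enumerate tokens 0).foldl
      (fun (st : PySem.Dict Int Int × Int) it =>
        (if st.1.contains st.2 then st.1 else st.1.insert st.2 it.1, st.2 + PySem.Str.len it.2))
      (PySem.Dict.empty, 0)).1
    let labels0 : List String := PySem.List.pyRepeat ["O"] (PySem.List.len tokens)
    let labels := p.2.foldl (fun labels ne =>
      match first.get? ne.1 with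
      | none => labels
      | some i => pvBScan ne.1 ne.2.1 tokens (PySem.List.pyRange i (PySem.List.len tokens) 1) labels ne.1)
      labels0
    result ++ [labels]) []

-- ===== PRECONDITION & SPEC =====
def Spec_convert_ne_list_2_iob2 (gold_tokens : List (List String)) (ne_lists : List (List (Int × Int × String))) (out : List (List String)) : Prop := out = convert_ne_list_2_iob2_alt gold_tokens ne_lists
instance (gold_tokens : List (List String)) (ne_lists : List (List (Int × Int × String))) (out : List (List String)) : Decidable (Spec_convert_ne_list_2_iob2 gold_tokens ne_lists out) := by unfold Spec_convert_ne_list_2_iob2; infer_instance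

-- ===== CLAIM (what is proved, stated in full; the proofs are below) =====
def Claim_equal_convert_ne_list_2_iob2 : Prop := ∀ (gold_tokens : List (List String)) (ne_lists : List (List (Int × Int × String))), Dom_convert_ne_list_2_iob2 gold_tokens ne_lists → Spec_convert_ne_list_2_iob2 gold_tokens ne_lists (convert_ne_list_2_iob2 gold_tokens ne_lists)

-- ===== LEMMAS AND PROOFS =====

-- recursive twin of A's inner token loop
def pvAScan (start stop : Int) : List String → Int → List String → Int → Bool → List String
  | [], _, labels, _, _ => labels
  | t :: ts, i, labels, o, bn =>
    if o = start then
      pvAScan start stop ts (i+1) (PySem.List.pySetD labels i "B") (o + PySem.Str.len t) true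
    else if bn && decide (start < o) && decide (o + PySem.Str.len t ≤ stop) then
      pvAScan start stop ts (i+1) (PySem.List.pySetD labels i "I") (o + PySem.Str.len t) true
    else
      pvAScan start stop ts (i+1) labels (o + PySem.Str.len t) false

-- recursive twin of pvBScan working on the token suffix instead of the index range
def pvBScan' (start stop : Int) : List String → Int → List String → Int → List String
  | [], _, labels, _ => labels
  | t :: ts, j, labels, o =>
    if o = start then pvBScan' start stop ts (j+1) (PySem.List.pySetD labels j "B") (o + PySem.Str.len t)
    else if o + PySem.Str.len t ≤ stop then pvBScan' start stop ts (j+1) (PySem.List.pySetD labels j "I") (o + PySem.Str.len t)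
    else labels

-- first token index whose cumulative offset equals start
def pvFind (start : Int) : List String → Int → Int → Option Int
  | [], _, _ => none
  | t :: ts, i, o => if o = start then some i else pvFind start ts (i+1) (o + PySem.Str.len t)

theorem pvLenNonneg (s : String) : (0:Int) ≤ PySem.Str.len s := by simp [PySem.Str.len_eq]

theorem pvA1 (start stop : Int) : ∀ (ts : List String) (i : Int) (labels : List String) (o : Int) (bn : Bool),
    ((PySem.List.enumerate ts i).foldl
      (fun (st : List String × Int × Bool) it =>
        if st.2.1 = start then
          (PySem.List.pySetD st.1 it.1 "B", st.2.1 + PySem.Str.len it.2, true)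
        else if st.2.2 && decide (start < st.2.1) && decide (st.2.1 + PySem.Str.len it.2 ≤ stop) then
          (PySem.List.pySetD st.1 it.1 "I", st.2.1 + PySem.Str.len it.2, true)
        else
          (st.1, st.2.1 + PySem.Str.len it.2, false))
      (labels, o, bn)).1 = pvAScan start stop ts i labels o bn := by
  intro ts
  induction ts with
  | nil => intro i labels o bn; simp [PySem.List.enumerate_nil, pvAScan]
  | cons t ts ih =>
    intro i labels o bn
    rw [PySem.List.enumerate_cons, List.foldl_cons]
    unfold pvAScan
    dsimp only
    split_ifs with h1 h2
    · exact ih (i+1) (PySem.List.pySetD labels i "B") (o + PySem.Str.len t) true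
    · exact ih (i+1) (PySem.List.pySetD labels i "I") (o + PySem.Str.len t) true
    · exact ih (i+1) labels (o + PySem.Str.len t) false

theorem pvSkip (start stop : Int) : ∀ (ts : List String) (i : Int) (labels : List String) (o : Int),
    start < o → pvAScan start stop ts i labels o false = labels := by
  intro ts
  induction ts with
  | nil => intro i labels o _; rfl
  | cons t ts ih =>
    intro i labels o h
    unfold pvAScan
    rw [if_neg (by omega), if_neg (by simp)]
    exact ih _ _ _ (by have := pvLenNonneg t; omega)

theorem pvAB (start stop : Int) : ∀ (ts : List String) (j : Int) (labels : List String) (o : Int) (bn : Bool),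
    start ≤ o → (o = start ∨ bn = true) →
    pvAScan start stop ts j labels o bn = pvBScan' start stop ts j labels o := by
  intro ts
  induction ts with
  | nil => intro j labels o bn _ _; rfl
  | cons t ts ih =>
    intro j labels o bn hle hcase
    unfold pvAScan pvBScan'
    by_cases h1 : o = start
    · rw [if_pos h1, if_pos h1]
      exact ih _ _ _ _ (by have := pvLenNonneg t; omega) (Or.inr rfl)
    · rw [if_neg h1, if_neg h1]
      have hbn : bn = true := hcase.resolve_left h1
      have hlt : start < o := lt_of_le_of_ne hle (fun h => h1 h.symm)
      by_cases h2 : o + PySem.Str.len t ≤ stop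
      · rw [if_pos (by rw [hbn, decide_eq_true hlt, decide_eq_true h2]; rfl), if_pos h2]
        exact ih _ _ _ _ (by have := pvLenNonneg t; omega) (Or.inr rfl)
      · rw [if_neg (by rw [hbn, decide_eq_true hlt, decide_eq_false h2]; simp), if_neg h2]
        exact pvSkip start stop ts (j+1) labels (o + PySem.Str.len t) (by have := pvLenNonneg t; omega)

theorem pvFindNone (start stop : Int) : ∀ (ts : List String) (i o : Int) (labels : List String),
    pvFind start ts i o = none → pvAScan start stop ts i labels o false = labels := by
  intro ts
  induction ts with
  | nil => intro i o labels _; rfl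
  | cons t ts ih =>
    intro i o labels h
    unfold pvFind at h
    by_cases h1 : o = start
    · rw [if_pos h1] at h; exact absurd h (by simp)
    · rw [if_neg h1] at h
      unfold pvAScan
      rw [if_neg h1, if_neg (by simp)]
      exact ih _ _ _ h

theorem pvFindSome (start stop : Int) : ∀ (ts : List String) (i o j : Int),
    pvFind start ts i o = some j →
    ∃ ts1 ts2, ts = ts1 ++ ts2 ∧ j = i + ts1.length ∧
      ∀ labels, pvAScan start stop ts i labels o false = pvBScan' start stop ts2 j labels start := by
  intro ts
  induction ts with
  | nil => intro i o j h; exact absurd h (by simp [pvFind])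
  | cons t ts ih =>
    intro i o j h
    unfold pvFind at h
    by_cases h1 : o = start
    · rw [if_pos h1] at h
      obtain rfl : i = j := by simpa using h
      subst h1
      refine ⟨[], t :: ts, by simp, by simp, fun labels => ?_⟩
      exact pvAB o stop (t :: ts) i labels o false le_rfl (Or.inl rfl)
    · rw [if_neg h1] at h
      obtain ⟨ts1, ts2, rfl, hj, heq⟩ := ih _ _ _ h
      refine ⟨t :: ts1, ts2, by simp, by rw [hj]; push_cast [List.length_cons]; omega, fun labels => ?_⟩
      unfold pvAScan
      rw [if_neg h1, if_neg (by simp)]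
      exact heq labels

theorem pvDict (x : Int) : ∀ (ts : List String) (i o : Int) (d : PySem.Dict Int Int),
    (((PySem.List.enumerate ts i).foldl
       (fun (st : PySem.Dict Int Int × Int) it =>
         (if st.1.contains st.2 then st.1 else st.1.insert st.2 it.1, st.2 + PySem.Str.len it.2))
       (d, o)).1).get? x = (d.get? x).or (pvFind x ts i o) := by
  intro ts
  induction ts with
  | nil => intro i o d; simp [PySem.List.enumerate_nil, pvFind]
  | cons t ts ih =>
    intro i o d
    rw [PySem.List.enumerate_cons, List.foldl_cons]
    dsimp only
    unfold pvFind
    by_cases hc : d.contains o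
    · rw [if_pos hc, ih]
      by_cases h1 : o = x
      · subst h1
        obtain ⟨v, hv⟩ := Option.isSome_iff_exists.mp
          (show (d.get? o).isSome = true by rw [← PySem.Dict.contains_eq_isSome_get?]; exact hc)
        rw [if_pos rfl, hv, Option.some_or, Option.some_or]
      · rw [if_neg h1]
    · rw [if_neg hc, ih]
      have hc' : d.contains o = false := by simpa using hc
      have hn : d.get? o = none := by
        rw [PySem.Dict.get?_eq_none_iff_contains]; exact hc'
      by_cases h1 : o = x
      · subst h1
        rw [PySem.Dict.get?_insert_self, hn, if_pos rfl, Option.some_or, Option.none_or]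
      · rw [if_neg h1, PySem.Dict.get?_insert_of_ne _ _ (fun h => h1 h.symm)]

theorem pvRangeBridge (start stop : Int) : ∀ (ts2 ts1 : List String) (labels : List String) (o : Int),
    pvBScan start stop (ts1 ++ ts2) (PySem.List.pyRange (ts1.length : Int) (PySem.List.len (ts1 ++ ts2)) 1) labels o
      = pvBScan' start stop ts2 (ts1.length : Int) labels o := by
  intro ts2
  induction ts2 with
  | nil =>
    intro ts1 labels o
    rw [List.append_nil]
    rw [show PySem.List.len ts1 = (ts1.length : Int) by simp]
    rw [PySem.List.pyRange_one_eq_nil le_rfl]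
    rfl
  | cons t ts2 ih =>
    intro ts1 labels o
    have hlen : PySem.List.len (ts1 ++ t :: ts2) = ((ts1.length : Int) + 1 + ts2.length) := by
      simp; ring
    have hlt : (ts1.length : Int) < (ts1.length : Int) + 1 + ts2.length := by omega
    rw [hlen, PySem.List.pyRange_one_cons hlt]
    unfold pvBScan
    have hget : PySem.List.pyGetD (ts1 ++ t :: ts2) (ts1.length : Int) "" = t := by
      show (PySem.List.pyGet? (ts1 ++ t :: ts2) (ts1.length : Int)).getD "" = t
      rw [PySem.List.pyGet?_append_length]; rfl
    have step : ∀ labels', pvBScan start stop (ts1 ++ t :: ts2)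
        (PySem.List.pyRange ((ts1.length : Int) + 1) ((ts1.length : Int) + 1 + ts2.length) 1) labels'
        (o + PySem.Str.len t) = pvBScan' start stop ts2 ((ts1.length : Int) + 1) labels' (o + PySem.Str.len t) := by
      intro labels'
      have h1 : ts1 ++ t :: ts2 = (ts1 ++ [t]) ++ ts2 := by simp
      have h2 : ((ts1 ++ [t]).length : Int) = (ts1.length : Int) + 1 := by simp
      have h3 : PySem.List.len ((ts1 ++ [t]) ++ ts2) = (ts1.length : Int) + 1 + ts2.length := by
        simp; ring
      rw [h1, show ((ts1.length : Int) + 1) = ((ts1 ++ [t]).length : Int) from h2.symm,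
        show ((ts1 ++ [t]).length : Int) + (ts2.length : Int) = PySem.List.len ((ts1 ++ [t]) ++ ts2) by rw [h3]; push_cast [h2]; ring]
      rw [ih (ts1 ++ [t]) labels' (o + PySem.Str.len t), h2]
    simp only [hget]
    unfold pvBScan'
    by_cases hb : o = start
    · rw [if_pos hb, if_pos hb, step]
    · rw [if_neg hb, if_neg hb]
      by_cases hi : o + PySem.Str.len t ≤ stop
      · rw [if_pos hi, if_pos hi, step]
      · rw [if_neg hi, if_neg hi]

-- per-named-entity equality: A's full rescan = dict lookup + span scan
theorem pvNE (tokens : List String) (start stop : Int) (labels : List String) :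
    pvAScan start stop tokens 0 labels 0 false =
      (match pvFind start tokens 0 0 with
       | none => labels
       | some j => pvBScan start stop tokens (PySem.List.pyRange j (PySem.List.len tokens) 1) labels start) := by
  cases hf : pvFind start tokens 0 0 with
  | none => exact pvFindNone start stop tokens 0 0 labels hf
  | some j =>
    obtain ⟨ts1, ts2, rfl, hj, heq⟩ := pvFindSome start stop _ 0 0 j hf
    have hj' : j = (ts1.length : Int) := by omega
    rw [heq labels, hj']
    exact (pvRangeBridge start stop ts2 ts1 labels start).symm

theorem pvFoldlExt {α β : Type} (f g : α → β → α) (h : ∀ a b, f a b = g a b) (l : List β) (a : α) :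
    l.foldl f a = l.foldl g a := by
  have : f = g := funext fun a => funext fun b => h a b
  rw [this]

theorem pvSentence (tokens : List String) (ne_list : List (Int × Int × String)) :
    (if ne_list.length ≠ 0 then
        ne_list.foldl (fun labels ne =>
          ((PySem.List.enumerate tokens 0).foldl
            (fun (st : List String × Int × Bool) it =>
              if st.2.1 = ne.1 then
                (PySem.List.pySetD st.1 it.1 "B", st.2.1 + PySem.Str.len it.2, true)
              else if st.2.2 && decide (ne.1 < st.2.1) && decide (st.2.1 + PySem.Str.len it.2 ≤ ne.2.1) then
                (PySem.List.pySetD st.1 it.1 "I", st.2.1 + PySem.Str.len it.2, true)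
              else
                (st.1, st.2.1 + PySem.Str.len it.2, false))
            (labels, 0, false)).1)
          ((PySem.List.pyRange 0 (PySem.List.len tokens) 1).map (fun _ => "O"))
      else (PySem.List.pyRange 0 (PySem.List.len tokens) 1).map (fun _ => "O"))
    = ne_list.foldl (fun labels ne =>
        match (((PySem.List.enumerate tokens 0).foldl
          (fun (st : PySem.Dict Int Int × Int) it =>
            (if st.1.contains st.2 then st.1 else st.1.insert st.2 it.1, st.2 + PySem.Str.len it.2))
          (PySem.Dict.empty, 0)).1).get? ne.1 with
        | none => labels
        | some i => pvBScan ne.1 ne.2.1 tokens (PySem.List.pyRange i (PySem.List.len tokens) 1) labels ne.1)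
        (PySem.List.pyRepeat ["O"] (PySem.List.len tokens)) := by
  have hinit : ((PySem.List.pyRange 0 (PySem.List.len tokens) 1).map (fun _ => "O"))
      = PySem.List.pyRepeat ["O"] (PySem.List.len tokens) := by
    rw [PySem.List.pyRepeat_singleton, List.map_const']
    congr 1
    rw [PySem.List.length_pyRange_one]
    simp
  have hbody : ∀ (labels : List String) (ne : Int × Int × String),
      ((PySem.List.enumerate tokens 0).foldl
        (fun (st : List String × Int × Bool) it =>
          if st.2.1 = ne.1 then
            (PySem.List.pySetD st.1 it.1 "B", st.2.1 + PySem.Str.len it.2, true)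
          else if st.2.2 && decide (ne.1 < st.2.1) && decide (st.2.1 + PySem.Str.len it.2 ≤ ne.2.1) then
            (PySem.List.pySetD st.1 it.1 "I", st.2.1 + PySem.Str.len it.2, true)
          else
            (st.1, st.2.1 + PySem.Str.len it.2, false))
        (labels, 0, false)).1
      = (match (((PySem.List.enumerate tokens 0).foldl
          (fun (st : PySem.Dict Int Int × Int) it =>
            (if st.1.contains st.2 then st.1 else st.1.insert st.2 it.1, st.2 + PySem.Str.len it.2))
          (PySem.Dict.empty, 0)).1).get? ne.1 with
        | none => labels
        | some i => pvBScan ne.1 ne.2.1 tokens (PySem.List.pyRange i (PySem.List.len tokens) 1) labels ne.1) := by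
    intro labels ne
    rw [pvA1 ne.1 ne.2.1 tokens 0 labels 0 false, pvDict ne.1 tokens 0 0 PySem.Dict.empty]
    simp only [PySem.Dict.get?_empty, Option.none_or]
    exact pvNE tokens ne.1 ne.2.1 labels
  by_cases hne : ne_list.length ≠ 0
  · rw [if_pos hne, hinit]
    exact pvFoldlExt _ _ hbody ne_list _
  · rw [if_neg hne]
    obtain rfl : ne_list = [] := by
      cases ne_list with
      | nil => rfl
      | cons a l => exact absurd (by simp) hne
    simp only [List.foldl_nil]
    exact hinit

-- ===== VERDICT (by name: the statement is the Claim_ definition above) =====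
theorem convert_ne_list_2_iob2_spec : Claim_equal_convert_ne_list_2_iob2 := by
  intro gold_tokens ne_lists _
  unfold Spec_convert_ne_list_2_iob2 convert_ne_list_2_iob2 convert_ne_list_2_iob2_alt
  refine pvFoldlExt _ _ (fun acc p => ?_) (gold_tokens.zip ne_lists) []
  dsimp only
  rw [pvSentence p.1 p.2]
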